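-- pv_equiv track=rewrite | github.com/yang-su2000/CP-Practice | archived/2022-11/834a.py | foo
-- ===== SOURCE A (Python) =====
-- d = {'Y': 'e', 'e': 's', 's': 'Y'}
--
-- def foo(s: str):
--     i = 0
--     while i < len(s):
--         if s[i] not in d:
--             return False
--         if i < len(s) - 1:
--             if d[s[i]] != s[i+1]:
--                 return False
--         i += 1
--     return True
-- ===== SOURCE B (Python) =====
-- def foo(s: str):
--     if not s:
--         return True
--     order = 'Yes'
--     if s[0] not in order:
--         return False
--     start = order.index(s[0])
--     expected = (order * (len(s) // 3 + 2))[start:start + len(s)]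
--     return s == expected
-- ===== Notes on version B (the rewrite author's own statement) =====
-- stated objective: idiomatic
-- what changed: B generates the expected cyclic Y-e-s window once (repeat the pattern, slice from the first character's offset) and compares it to the whole string, replacing A's per-character dict-transition while loop.
import Mathlib
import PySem

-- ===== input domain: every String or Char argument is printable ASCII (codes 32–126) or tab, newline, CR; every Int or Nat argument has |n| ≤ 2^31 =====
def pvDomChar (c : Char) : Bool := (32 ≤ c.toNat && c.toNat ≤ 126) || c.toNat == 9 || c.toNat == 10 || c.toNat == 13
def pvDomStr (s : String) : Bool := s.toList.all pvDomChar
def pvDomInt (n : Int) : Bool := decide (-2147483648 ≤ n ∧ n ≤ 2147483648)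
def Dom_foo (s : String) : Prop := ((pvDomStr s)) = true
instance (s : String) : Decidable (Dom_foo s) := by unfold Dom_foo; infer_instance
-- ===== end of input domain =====

-- B validates the 'Yes'-cycle by generating the expected cyclic window once and comparing,
-- instead of A's per-character transition checks (objective: idiomatic/alternative; no speed claim).

-- ===== PORT A =====
-- d = {'Y': 'e', 'e': 's', 's': 'Y'}
def fooD : PySem.Dict Char Char := PySem.Dict.ofList [('Y', 'e'), ('e', 's'), ('s', 'Y')]

-- the while loop of A, position i ↔ the remaining suffix s[i:]
def fooAux : List Char → Bool
  | [] => true                                   -- loop exits: return True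
  | c :: rest =>
    if ¬ fooD.contains c then false              -- if s[i] not in d: return False
    else
      match rest with
      | c2 :: _ =>                               -- i < len(s) - 1
        if fooD.getD c ' ' != c2 then false      -- if d[s[i]] != s[i+1]: return False
        else fooAux rest                         -- i += 1
      | [] => fooAux rest                        -- i += 1 (last position)

def foo (s : String) : Bool := fooAux s.toList

-- ===== PORT B =====
def fooOrder : List Char := ['Y', 'e', 's']      -- order = 'Yes'

def foo_alt (s : String) : Bool :=
  match s.toList with
  | [] => true                                   -- if not s: return True
  | c :: rest =>
    if ¬ fooOrder.contains c then false          -- if s[0] not in order: return False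
    else
      let n := rest.length + 1                   -- len(s)
      let start := PySem.Chars.find fooOrder [c] -- order.index(s[0])
      let expected := PySem.List.slice (List.flatten (List.replicate (n / 3 + 2) fooOrder))
                        (some start) (some (start + (n : Int)))
      decide (c :: rest = expected)              -- return s == expected

-- ===== PRECONDITION & SPEC =====
def Spec_foo (s : String) (out : Bool) : Prop := out = foo_alt s
instance (s : String) (out : Bool) : Decidable (Spec_foo s out) := by unfold Spec_foo; infer_instance

-- ===== CLAIM (what is proved, stated in full; the proofs are below) =====
def Claim_equal_foo : Prop := ∀ (s : String), Dom_foo s → Spec_foo s (foo s)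

-- ===== LEMMAS AND PROOFS =====

/-- successor in the cycle Y → e → s → Y (value on other chars irrelevant). -/
def nxt (c : Char) : Char := if c = 'Y' then 'e' else if c = 'e' then 's' else 'Y'

/-- membership in the cycle, as a Bool. -/
def memB (c : Char) : Bool := c == 'Y' || c == 'e' || c == 's'

/-- the expected cyclic word of length n starting at c. -/
def expF : Char → Nat → List Char
  | _, 0 => []
  | c, n + 1 => c :: expF (nxt c) n

lemma contains_d (c : Char) : fooD.contains c = memB c := by
  have h : fooD.items = [('Y', 'e'), ('e', 's'), ('s', 'Y')] := by decide
  simp [PySem.Dict.contains, h, memB, List.any, Bool.or_assoc, BEq.comm]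

lemma memB_cases (c : Char) (h : memB c = true) : c = 'Y' ∨ c = 'e' ∨ c = 's' := by
  simp [memB] at h
  tauto

lemma getD_d (c : Char) (h : memB c = true) : fooD.getD c ' ' = nxt c := by
  rcases memB_cases c h with h|h|h <;> subst h <;> decide

lemma memB_nxt (c : Char) (h : memB c = true) : memB (nxt c) = true := by
  rcases memB_cases c h with h|h|h <;> subst h <;> decide

lemma expF_zero (c : Char) : expF c 0 = [] := rfl

lemma expF_succ (c : Char) (n : Nat) : expF c (n + 1) = c :: expF (nxt c) n := rfl

lemma fooAux_eq (rest : List Char) : ∀ c, fooAux (c :: rest) =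
    (memB c && decide (rest = expF (nxt c) rest.length)) := by
  induction rest with
  | nil =>
    intro c
    rw [show fooAux (c :: []) = if ¬ fooD.contains c then false else fooAux [] from rfl]
    simp [fooAux, contains_d, expF_zero]
  | cons c2 rest' ih =>
    intro c
    rw [show fooAux (c :: c2 :: rest') =
        (if ¬ fooD.contains c then false
         else if fooD.getD c ' ' != c2 then false else fooAux (c2 :: rest')) from rfl]
    by_cases hm : memB c = true
    · by_cases he : nxt c = c2
      · subst he
        rw [contains_d, hm, getD_d c hm, ih]
        simp [memB_nxt c hm, List.length_cons, expF_succ]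
      · simp [contains_d, hm, getD_d c hm, he, expF_succ]
        intro h
        exact absurd h.symm he
    · rw [Bool.not_eq_true] at hm
      simp [contains_d, hm]

/-- index of a cycle member in `fooOrder`. -/
def idx (c : Char) : Nat := if c = 'Y' then 0 else if c = 'e' then 1 else 2

lemma repExp : ∀ (n m : Nat) (c : Char), memB c = true → n + idx c ≤ 3 * m →
    ((List.flatten (List.replicate m fooOrder)).drop (idx c)).take n = expF c n := by
  intro n
  induction n with
  | zero => intro m c _ _; rw [List.take_zero, expF_zero]
  | succ n ih =>
    intro m c hc hle
    obtain ⟨m', rfl⟩ : ∃ m', m = m' + 1 := ⟨m - 1, by omega⟩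
    rw [List.replicate_succ, List.flatten_cons]
    rcases memB_cases c hc with h|h|h <;> subst h
    · have := ih (m' + 1) 'e' (by decide) (by simp [idx] at hle ⊢; omega)
      rw [List.replicate_succ, List.flatten_cons] at this
      simpa [fooOrder, idx, expF_succ, nxt] using this
    · have := ih (m' + 1) 's' (by decide) (by simp [idx] at hle ⊢; omega)
      rw [List.replicate_succ, List.flatten_cons] at this
      simpa [fooOrder, idx, expF_succ, nxt] using this
    · have := ih m' 'Y' (by decide) (by simp [idx] at hle ⊢; omega)
      simpa [fooOrder, idx, expF_succ, nxt] using this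

lemma contains_order (c : Char) : fooOrder.contains c = memB c := by
  show (['Y', 'e', 's'] : List Char).contains c = memB c
  rw [List.contains_cons, List.contains_cons, List.contains_cons]
  simp [memB, Bool.or_assoc]

lemma hslice {α : Type} (L : List α) (k : Int) (hk : 0 ≤ k) (n : Nat) :
    PySem.List.slice L (some k) (some (k + (n : Int))) = (L.drop k.toNat).take n := by
  rw [PySem.List.slice_toNat _ hk (by positivity)]
  congr 1
  omega

-- ===== VERDICT (by name: the statement is the Claim_ definition above) =====
theorem foo_spec : Claim_equal_foo := by
  intro s _
  unfold Spec_foo foo foo_alt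
  cases hs : s.toList with
  | nil => simp [fooAux]
  | cons c rest =>
    rw [fooAux_eq]
    by_cases hm : memB c = true
    · rcases memB_cases c hm with h|h|h <;> subst h <;>
        simp only [contains_order,
          show PySem.Chars.find fooOrder ['Y'] = 0 from by decide,
          show PySem.Chars.find fooOrder ['e'] = 1 from by decide,
          show PySem.Chars.find fooOrder ['s'] = 2 from by decide]
      · rw [hslice _ 0 (by norm_num) (rest.length + 1),
          show ((0 : Int).toNat) = idx 'Y' from by decide,
          repExp (rest.length + 1) _ 'Y' (by decide) (by simp [idx]; omega)]
        simp [expF_succ, nxt, memB]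
      · rw [hslice _ 1 (by norm_num) (rest.length + 1),
          show ((1 : Int).toNat) = idx 'e' from by decide,
          repExp (rest.length + 1) _ 'e' (by decide) (by simp [idx]; omega)]
        simp [expF_succ, nxt, memB]
      · rw [hslice _ 2 (by norm_num) (rest.length + 1),
          show ((2 : Int).toNat) = idx 's' from by decide,
          repExp (rest.length + 1) _ 's' (by decide) (by simp [idx]; omega)]
        simp [expF_succ, nxt, memB]
    · rw [Bool.not_eq_true] at hm
      have h1 : fooOrder.contains c = false := by rw [contains_order, hm]
      have hmem : c ∉ fooOrder := by simp at h1; exact h1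
      simp [hmem, hm]
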